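-- pv_equiv track=rewrite | github.com/YashB63/GFG-Daily-Questions | Day 281/Right most non zero digit/right_most_non_zero_digit.py | rightmostNonZeroDigit
-- ===== SOURCE A (Python) =====
-- def rightmostNonZeroDigit (N, A):
--     c2 = 0
--     c5 = 0
--     result = 1
--     for num in A:
--         if num == 0:
--             return -1
--         while num%2 == 0:
--             c2 += 1
--             num = num//2
--
--         while num%5 == 0:
--             c5 += 1
--             num = num//5
--
--         result = (result * num)%10
--
--     ex2 = c2-c5
--
--     if ex2>0:
--         return result * (2**ex2) %10
--     elif ex2<0:
--         return result * (5**abs(ex2)) %10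
--     return result
-- ===== SOURCE B (Python) =====
-- def rightmostNonZeroDigit(N, A):
--     P = 1
--     for num in A:
--         if num == 0:
--             return -1
--         P *= num
--     while P % 10 == 0:
--         P //= 10
--     return P % 10
-- ===== Notes on version B (the rewrite author's own statement) =====
-- stated objective: simpler
-- what changed: Replaces A's 2/5 factor-counting with mod-10 bookkeeping by a direct running product of the whole array, followed by stripping trailing zeros and taking the last digit.
import Mathlib
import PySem

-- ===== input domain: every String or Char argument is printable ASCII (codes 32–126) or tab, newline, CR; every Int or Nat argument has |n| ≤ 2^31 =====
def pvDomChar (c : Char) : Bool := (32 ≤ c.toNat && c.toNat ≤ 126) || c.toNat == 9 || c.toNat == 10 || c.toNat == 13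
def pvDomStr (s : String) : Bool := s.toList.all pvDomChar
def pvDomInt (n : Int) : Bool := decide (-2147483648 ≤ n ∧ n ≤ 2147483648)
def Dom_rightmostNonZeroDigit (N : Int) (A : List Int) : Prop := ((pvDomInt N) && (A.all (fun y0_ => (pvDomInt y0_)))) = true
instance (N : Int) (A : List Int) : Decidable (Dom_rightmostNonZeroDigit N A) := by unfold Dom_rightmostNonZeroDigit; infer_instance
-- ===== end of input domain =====

-- B replaces A's 2/5 factor-counting and reconstruction by a direct running product,
-- then strips trailing zeros and returns the last digit (objective: simpler).

-- termination helper for the ports' strip loops (cited by decreasing_by)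
theorem pvDivShrink (num d : Int) (hd : 1 < d) (h0 : num ≠ 0)
    (hm : PySem.Int.mod num d = 0) :
    (PySem.Int.floordiv num d).natAbs < num.natAbs := by
  have hdvd : d ∣ num := (PySem.Int.mod_eq_zero_iff_dvd num d).mp hm
  obtain ⟨k, rfl⟩ := hdvd
  have hk : k ≠ 0 := by rintro rfl; simp at h0
  rw [PySem.Int.floordiv_eq_ediv_of_pos (by omega),
      Int.mul_ediv_cancel_left _ (by omega : d ≠ 0)]
  rw [Int.natAbs_mul]
  have h2 : 2 ≤ d.natAbs := by omega
  have hk' : 0 < k.natAbs := Int.natAbs_pos.mpr hk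
  nlinarith

-- ===== PORT A =====
-- 'while num % p == 0: c += 1; num //= p'  (num ≠ 0 guard only makes the loop total;
-- A's callers always have num ≠ 0 here)
def pvStripP (p c num : Int) : Int × Int :=
  if h : num ≠ 0 ∧ PySem.Int.mod num p = 0 ∧ 1 < p then
    pvStripP p (c + 1) (PySem.Int.floordiv num p)
  else (c, num)
termination_by num.natAbs
decreasing_by exact pvDivShrink num p h.2.2 h.1 h.2.1

def pvGoA (c2 c5 result : Int) : List Int → Int
  | [] =>
    let ex2 := c2 - c5
    if ex2 > 0 then PySem.Int.mod (result * 2 ^ ex2.toNat) 10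
    else if ex2 < 0 then PySem.Int.mod (result * 5 ^ ex2.natAbs) 10
    else result
  | num :: rest =>
    if num = 0 then -1
    else
      let s2 := pvStripP 2 c2 num
      let s5 := pvStripP 5 c5 s2.2
      pvGoA s2.1 s5.1 (PySem.Int.mod (result * s5.2) 10) rest

def rightmostNonZeroDigit (N : Int) (A : List Int) : Int := pvGoA 0 0 1 A

-- ===== PORT B =====
-- 'while P % 10 == 0: P //= 10'  (P ≠ 0 guard only makes the loop total; B's P is
-- a product of nonzero factors)
def pvStrip10 (P : Int) : Int :=
  if h : P ≠ 0 ∧ PySem.Int.mod P 10 = 0 then pvStrip10 (PySem.Int.floordiv P 10)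
  else P
termination_by P.natAbs
decreasing_by exact pvDivShrink P 10 (by norm_num) h.1 h.2

def pvGoB (P : Int) : List Int → Int
  | [] => PySem.Int.mod (pvStrip10 P) 10
  | num :: rest => if num = 0 then -1 else pvGoB (P * num) rest

def rightmostNonZeroDigit_alt (N : Int) (A : List Int) : Int := pvGoB 1 A

-- ===== PRECONDITION & SPEC =====
def Spec_rightmostNonZeroDigit (N : Int) (A : List Int) (out : Int) : Prop := out = rightmostNonZeroDigit_alt N A
instance (N : Int) (A : List Int) (out : Int) : Decidable (Spec_rightmostNonZeroDigit N A out) := by unfold Spec_rightmostNonZeroDigit; infer_instance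

-- ===== CLAIM (what is proved, stated in full; the proofs are below) =====
def Claim_equal_rightmostNonZeroDigit : Prop := ∀ (N : Int) (A : List Int), Dom_rightmostNonZeroDigit N A → Spec_rightmostNonZeroDigit N A (rightmostNonZeroDigit N A)

-- ===== LEMMAS AND PROOFS =====

-- PySem floor-mod by the positive literal 10 is Lean's emod
theorem pvMod10 (a : Int) : PySem.Int.mod a 10 = a % 10 :=
  PySem.Int.mod_eq_emod_of_pos (by norm_num)

-- pvStripP fully characterised: it splits off the p-valuation
theorem pvStripP_spec : ∀ (p c num : Int), 1 < p → num ≠ 0 →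
    ∃ (v : Nat) (m : Int), pvStripP p c num = (c + v, m) ∧ num = p ^ v * m ∧
      ¬ p ∣ m ∧ m ≠ 0 := by
  intro p c num
  induction c, num using pvStripP.induct p with
  | case1 c num h ih =>
    intro hp h0
    obtain ⟨k, hk⟩ := (PySem.Int.mod_eq_zero_iff_dvd num p).mp h.2.1
    have hflo : PySem.Int.floordiv num p = k := by
      rw [hk, PySem.Int.floordiv_eq_ediv_of_pos (by omega),
        Int.mul_ediv_cancel_left _ (by omega : p ≠ 0)]
    have hk0 : k ≠ 0 := by rintro rfl; simp at hk; exact h0 hk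
    obtain ⟨v, m, he, hfact, hnd, hm0⟩ := ih hp (hflo ▸ hk0)
    refine ⟨v + 1, m, ?_, ?_, hnd, hm0⟩
    · rw [pvStripP, dif_pos h, he]
      congr 1
      push_cast; ring
    · rw [hflo] at hfact
      rw [hk, hfact]; ring
  | case2 c num h =>
    intro hp h0
    refine ⟨0, num, by rw [pvStripP, dif_neg h]; simp, by simp, ?_, h0⟩
    intro hdvd
    exact h ⟨h0, (PySem.Int.mod_eq_zero_iff_dvd num p).mpr hdvd, hp⟩

-- stripping helper lemmas
theorem pvStrip10_stop (Q : Int) (h : ¬ (10:Int) ∣ Q) : pvStrip10 Q = Q := by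
  rw [pvStrip10]
  rw [dif_neg]
  rintro ⟨h0, hm⟩
  exact h ((PySem.Int.mod_eq_zero_iff_dvd Q 10).mp hm)

theorem pvStrip10_pow (k : Nat) (Q : Int) (hQ : Q ≠ 0) :
    pvStrip10 (10 ^ k * Q) = pvStrip10 Q := by
  induction k with
  | zero => simp
  | succ n ih =>
    rw [pvStrip10]
    rw [dif_pos]
    · have : PySem.Int.floordiv (10 ^ (n+1) * Q) 10 = 10 ^ n * Q := by
        rw [PySem.Int.floordiv_eq_ediv_of_pos (by norm_num), pow_succ,
          mul_comm (10^n : Int) 10, mul_assoc, Int.mul_ediv_cancel_left _ (by norm_num)]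
      rw [this, ih]
    · constructor
      · positivity
      · rw [(PySem.Int.mod_eq_zero_iff_dvd _ 10)]
        exact ⟨10 ^ n * Q, by ring⟩

-- the number-theory core: A's final combination equals strip-then-last-digit of the product
theorem pvFinal (a b : Nat) (m : Int) (hm : m ≠ 0) (h2 : ¬ (2:Int) ∣ m) (h5 : ¬ (5:Int) ∣ m) :
    pvGoA (a : Int) (b : Int) (m % 10) [] = pvGoB (2 ^ a * 5 ^ b * m) [] := by
  have hp5 : Prime (5 : Int) := by norm_num
  have h10 : ¬ (10:Int) ∣ m := fun hd => h2 (dvd_trans (by norm_num) hd)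
  simp only [pvGoA, pvGoB]
  rcases Nat.lt_trichotomy a b with hab | hab | hab
  · -- a < b : excess fives
    have hex : ¬ ((a:Int) - b > 0) := by omega
    have hex' : (a:Int) - b < 0 := by omega
    have hQ0 : (5:Int) ^ (b - a) * m ≠ 0 := mul_ne_zero (pow_ne_zero _ (by norm_num)) hm
    have hsplit : (2:Int) ^ a * 5 ^ b * m = 10 ^ a * (5 ^ (b - a) * m) := by
      have hb : (5:Int) ^ b = 5 ^ a * 5 ^ (b - a) := by
        rw [← pow_add]; congr 1; omega
      rw [hb, (by norm_num : (10:Int) = 2 * 5), mul_pow]; ring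
    have hQ10 : ¬ (10:Int) ∣ 5 ^ (b - a) * m := by
      intro hd
      have h2d : (2:Int) ∣ 5 ^ (b - a) * m := dvd_trans (by norm_num) hd
      rcases ((by norm_num : Prime (2:Int)).dvd_mul).mp h2d with h | h
      · have := (by norm_num : Prime (2:Int)).dvd_of_dvd_pow h
        norm_num at this
      · exact h2 h
    rw [if_neg hex, if_pos hex', hsplit, pvStrip10_pow _ _ hQ0, pvStrip10_stop _ hQ10,
      pvMod10, pvMod10]
    have hna : ((a:Int) - b).natAbs = b - a := by omega
    rw [hna, Int.mul_emod, Int.mul_emod (5 ^ (b - a)) m,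
      Int.emod_emod_of_dvd _ (dvd_refl 10)]
    ring_nf
  · -- a = b : the tens cancel exactly
    subst hab
    have hsplit : (2:Int) ^ a * 5 ^ a * m = 10 ^ a * m := by
      rw [(by norm_num : (10:Int) = 2 * 5), mul_pow]
    rw [if_neg (by omega : ¬ ((a:Int) - a > 0)), if_neg (by omega : ¬ ((a:Int) - a < 0)),
      hsplit, pvStrip10_pow _ _ hm, pvStrip10_stop _ h10, pvMod10]
  · -- b < a : excess twos
    have hex : (a:Int) - b > 0 := by omega
    have hQ0 : (2:Int) ^ (a - b) * m ≠ 0 := mul_ne_zero (pow_ne_zero _ (by norm_num)) hm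
    have hsplit : (2:Int) ^ a * 5 ^ b * m = 10 ^ b * (2 ^ (a - b) * m) := by
      have ha : (2:Int) ^ a = 2 ^ b * 2 ^ (a - b) := by
        rw [← pow_add]; congr 1; omega
      rw [ha, (by norm_num : (10:Int) = 2 * 5), mul_pow]; ring
    have hQ10 : ¬ (10:Int) ∣ 2 ^ (a - b) * m := by
      intro hd
      have h5d : (5:Int) ∣ 2 ^ (a - b) * m := dvd_trans (by norm_num) hd
      rcases (hp5.dvd_mul).mp h5d with h | h
      · have := hp5.dvd_of_dvd_pow h
        norm_num at this
      · exact h5 h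
    rw [if_pos hex, hsplit, pvStrip10_pow _ _ hQ0, pvStrip10_stop _ hQ10,
      pvMod10, pvMod10]
    have hna : ((a:Int) - b).toNat = a - b := by omega
    rw [hna, Int.mul_emod, Int.mul_emod (2 ^ (a - b)) m,
      Int.emod_emod_of_dvd _ (dvd_refl 10)]
    ring_nf

-- the loop invariant
theorem pvLoop (L : List Int) : ∀ (a b : Nat) (m : Int), m ≠ 0 →
    ¬ (2:Int) ∣ m → ¬ (5:Int) ∣ m →
    pvGoA (a : Int) (b : Int) (m % 10) L = pvGoB (2 ^ a * 5 ^ b * m) L := by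
  induction L with
  | nil => intro a b m hm h2 h5; exact pvFinal a b m hm h2 h5
  | cons num rest ih =>
    intro a b m hm h2 h5
    by_cases hz : num = 0
    · simp [pvGoA, pvGoB, hz]
    · obtain ⟨v2, n1, hs2, hf2, hnd2, hn1⟩ := pvStripP_spec 2 (a:Int) num (by norm_num) hz
      obtain ⟨v5, n2, hs5, hf5, hnd5, hn2⟩ := pvStripP_spec 5 (b:Int) n1 (by norm_num) hn1
      have hnd2' : ¬ (2:Int) ∣ n2 := fun hd => hnd2 (hd.trans ⟨5 ^ v5, by rw [hf5]; ring⟩)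
      have hm2 : ¬ (2:Int) ∣ m * n2 := by
        intro hd
        rcases ((by norm_num : Prime (2:Int)).dvd_mul).mp hd with h | h
        · exact h2 h
        · exact hnd2' h
      have hm5 : ¬ (5:Int) ∣ m * n2 := by
        intro hd
        rcases ((by norm_num : Prime (5:Int)).dvd_mul).mp hd with h | h
        · exact h5 h
        · exact hnd5 h
      have hres : PySem.Int.mod (m % 10 * n2) 10 = (m * n2) % 10 := by
        rw [pvMod10, Int.mul_emod, Int.emod_emod_of_dvd _ (dvd_refl 10), ← Int.mul_emod]
      have hprod : 2 ^ a * 5 ^ b * m * num = 2 ^ (a + v2) * 5 ^ (b + v5) * (m * n2) := by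
        rw [hf2, hf5, pow_add, pow_add]; ring
      have := ih (a + v2) (b + v5) (m * n2) (mul_ne_zero hm hn2) hm2 hm5
      simp only [pvGoA, pvGoB, if_neg hz, hs2, hs5, hres, hprod]
      push_cast at this ⊢
      exact this

-- ===== VERDICT (by name: the statement is the Claim_ definition above) =====
theorem rightmostNonZeroDigit_spec : Claim_equal_rightmostNonZeroDigit := by
  intro N A _
  unfold Spec_rightmostNonZeroDigit rightmostNonZeroDigit rightmostNonZeroDigit_alt
  have := pvLoop A 0 0 1 (by norm_num) (by norm_num) (by norm_num)
  simpa using this
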